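-- pv_equiv track=rewrite | github.com/daniel-reich/turbo-robot | b8wRDMWgMZTN2nmfx_15.py | equal
-- ===== SOURCE A (Python) =====
-- def equal(a, b, c):
--   txt = a,b
--   x = sum(2 if c == i else 0 for i in txt)
--   if x == 4:
--     return x -1
--   if x == 0:
--     t = c,b
--     return sum(2 if a == i else 0 for i in t)
--   return x
-- ===== SOURCE B (Python) =====
-- def equal(a, b, c):
--     if a == b == c:
--         return 3
--     if a == b or b == c or a == c:
--         return 2
--     return 0
-- ===== Notes on version B (the rewrite author's own statement) =====
-- stated objective: simpler
-- what changed: Replaces the generator-sum scoring (2 per match against c, a second sum over (c,b) when the first is 0) and the x==4/x==0 arithmetic branch chain with a direct equality-case analysis: 3 if all equal, 2 if any pair equal, else 0.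
import Mathlib
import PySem

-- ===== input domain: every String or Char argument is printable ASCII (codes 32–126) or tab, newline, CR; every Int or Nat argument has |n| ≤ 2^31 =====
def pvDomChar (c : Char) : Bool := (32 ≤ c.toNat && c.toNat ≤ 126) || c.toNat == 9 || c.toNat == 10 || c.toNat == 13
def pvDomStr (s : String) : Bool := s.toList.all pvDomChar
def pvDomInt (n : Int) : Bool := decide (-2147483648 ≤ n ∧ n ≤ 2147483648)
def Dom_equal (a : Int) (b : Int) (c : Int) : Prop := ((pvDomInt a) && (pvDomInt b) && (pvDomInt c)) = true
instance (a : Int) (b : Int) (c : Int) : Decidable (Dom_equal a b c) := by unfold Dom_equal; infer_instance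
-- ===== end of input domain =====

-- B replaces A's generator-sum scoring and x==4/x==0 branch arithmetic with a direct
-- equality-case analysis (all equal -> 3, any pair -> 2, else 0); objective: simpler.


-- ===== PORT A =====
def equal (a : Int) (b : Int) (c : Int) : Int :=
  let txt := [a, b]
  let x := txt.foldl (fun s i => s + (if c == i then 2 else 0)) 0
  if x == 4 then x - 1
  else if x == 0 then
    let t := [c, b]
    t.foldl (fun s i => s + (if a == i then 2 else 0)) 0
  else x

-- ===== PORT B =====
def equal_alt (a : Int) (b : Int) (c : Int) : Int :=
  if a = b ∧ b = c then 3
  else if a = b ∨ b = c ∨ a = c then 2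
  else 0

-- ===== PRECONDITION & SPEC =====
def Spec_equal (a : Int) (b : Int) (c : Int) (out : Int) : Prop := out = equal_alt a b c
instance (a : Int) (b : Int) (c : Int) (out : Int) : Decidable (Spec_equal a b c out) := by unfold Spec_equal; infer_instance

-- ===== CLAIM (what is proved, stated in full; the proofs are below) =====
def Claim_equal_equal : Prop := ∀ (a : Int) (b : Int) (c : Int), Dom_equal a b c → Spec_equal a b c (equal a b c)

-- ===== LEMMAS AND PROOFS =====

-- ===== VERDICT (by name: the statement is the Claim_ definition above) =====
theorem equal_spec : Claim_equal_equal := by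
  intro a b c _
  unfold Spec_equal equal equal_alt
  by_cases h1 : c = a <;> by_cases h2 : c = b <;> by_cases h3 : a = b <;>
    simp [h1, h2, h3] <;> omega
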